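-- pv_equiv track=rewrite | github.com/mintropy/algorithm_pulzo | 이영준/2022/03/0328/1484.py | search
-- ===== SOURCE A (Python) =====
-- def search(G) -> list:
--     result = []
--     st = end = 1
--     while True:
--         res = end * end - st * st
--         if res == G:
--             result.append(end)
--             end += 1
--         elif res < G:
--             end += 1
--         else:
--             if end - st == 1:
--                 break
--             st += 1
--     return result
-- ===== SOURCE B (Python) =====
-- def search(G) -> list:
--     # Factorization approach: n*n - k*k = G  <=>  (n-k)(n+k) = G with d = n-k,
--     # e = n+k a divisor pair of the same parity, d < e; n = (d+e)//2.
--     # Divisors d are scanned up to sqrt(G); n decreases as d grows, so the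
--     # collected list is reversed to get increasing order.
--     result = []
--     d = 1
--     while d * d <= G:
--         if G % d == 0:
--             e = G // d
--             if d < e and (d + e) % 2 == 0:
--                 result.append((d + e) // 2)
--         d += 1
--     result.reverse()
--     return result
-- ===== Notes on version B (the rewrite author's own statement) =====
-- stated objective: faster
-- what changed: Replaces the O(G) two-pointer scan over (st,end) pairs by trial division up to the square root of G: each divisor pair (d,e)=(n-k,n+k) of G with d<e and equal parity yields n as their half-sum, collected with d ascending and reversed into increasing order.
-- outside the precondition, e.g. on search(0): A returns [1], B returns []; on search(-3): A does not finish within the time limit, B returns []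
import Mathlib
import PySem

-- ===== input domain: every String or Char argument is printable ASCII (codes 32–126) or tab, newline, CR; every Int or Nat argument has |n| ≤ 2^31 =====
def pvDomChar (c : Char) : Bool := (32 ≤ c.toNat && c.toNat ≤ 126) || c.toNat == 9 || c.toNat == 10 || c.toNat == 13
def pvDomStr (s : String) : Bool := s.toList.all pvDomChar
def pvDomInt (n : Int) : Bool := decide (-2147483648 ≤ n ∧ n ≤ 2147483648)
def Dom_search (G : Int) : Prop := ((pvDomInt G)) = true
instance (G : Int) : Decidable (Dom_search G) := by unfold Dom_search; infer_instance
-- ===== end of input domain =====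

-- B replaces A's O(G) two-pointer scan by trial division over divisor pairs of G up to sqrt(G) (asymptotically faster, measured).


-- ===== PORT A =====
-- literal port of A's `while True` loop; the fuel (2*G+8).toNat is shown below to cover every G ≥ 1,
-- and outside Pre_search (where the Python diverges) nothing is claimed.
def loopA (G : Int) : Nat → Int → Int → List Int → List Int
  | 0, _, _, acc => acc
  | f+1, st, e, acc =>
    let res := e * e - st * st
    if res = G then loopA G f st (e + 1) (acc ++ [e])
    else if res < G then loopA G f st (e + 1) acc
    else if e - st = 1 then acc
    else loopA G f (st + 1) e acc

def search (G : Int) : List Int := loopA G (2 * G + 8).toNat 1 1 []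

-- ===== PORT B =====
-- literal port of Source B's `while d * d <= G` loop; the fuel G.toNat + 1 covers every d scanned.
def loopB (G : Int) : Nat → Int → List Int → List Int
  | 0, _, acc => acc
  | f+1, d, acc =>
    if d * d ≤ G then
      loopB G f (d + 1)
        (if PySem.Int.mod G d = 0 ∧ d < PySem.Int.floordiv G d ∧
            PySem.Int.mod (d + PySem.Int.floordiv G d) 2 = 0
         then acc ++ [PySem.Int.floordiv (d + PySem.Int.floordiv G d) 2]
         else acc)
    else acc

def search_alt (G : Int) : List Int := (loopB G (G.toNat + 1) 1 []).reverse

-- ===== PRECONDITION & SPEC =====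
-- Pre_ excludes non-positive G: on negative G the Python A never returns (its loop runs forever),
-- and at zero A returns an accidental singleton although the solution set is infinite, so no finite
-- list is canonical; B returns an empty list on all of them.
def Pre_search (G : Int) : Prop := 1 ≤ G
instance (G : Int) : Decidable (Pre_search G) := by unfold Pre_search; infer_instance
def pvWitness_search : Int := 15
def Spec_search (G : Int) (out : List Int) : Prop := out = search_alt G
instance (G : Int) (out : List Int) : Decidable (Spec_search G out) := by unfold Spec_search; infer_instance

-- ===== CLAIM (what is proved, stated in full; the proofs are below) =====
def Claim_equal_search : Prop := ∀ (G : Int), Dom_search G → Pre_search G → Spec_search G (search G)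

-- ===== LEMMAS AND PROOFS =====

-- n is an answer: some k ≥ 1 has n*n - k*k = G
def Valid (G n : Int) : Prop := ∃ k : Int, 1 ≤ k ∧ k < n ∧ n * n - k * k = G

def validB (G n : Int) : Bool :=
  (List.range (n - 1).toNat).any (fun i => n * n - ((i : Int) + 1) * ((i : Int) + 1) == G)

lemma validB_iff (G n : Int) : validB G n = true ↔ Valid G n := by
  simp only [validB, List.any_eq_true, List.mem_range, beq_iff_eq, Valid]
  constructor
  · rintro ⟨i, hi, heq⟩
    exact ⟨(i : Int) + 1, by omega, by omega, heq⟩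
  · rintro ⟨k, hk1, hk2, hk3⟩
    refine ⟨(k - 1).toNat, by omega, ?_⟩
    have hcast : ((k - 1).toNat : Int) + 1 = k := by omega
    rw [hcast]; exact hk3

-- increasing reference list of the answers in [e, e + f)
def ref (G : Int) : Nat → Int → List Int
  | 0, _ => []
  | f+1, e => if validB G e then e :: ref G f (e + 1) else ref G f (e + 1)

lemma ref_mem (G : Int) : ∀ (f : Nat) (e x : Int),
    x ∈ ref G f e ↔ e ≤ x ∧ x < e + f ∧ Valid G x := by
  intro f
  induction f with
  | zero => intro e x; simp [ref]; omega
  | succ f ih =>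
    intro e x
    simp only [ref]
    by_cases h : validB G e = true
    · rw [if_pos h, List.mem_cons, ih]
      constructor
      · rintro (rfl | ⟨h1, h2, h3⟩)
        · exact ⟨le_refl x, by push_cast; omega, (validB_iff G x).1 h⟩
        · exact ⟨by omega, by push_cast at h2 ⊢; omega, h3⟩
      · rintro ⟨h1, h2, h3⟩
        by_cases hx : x = e
        · exact Or.inl hx
        · exact Or.inr ⟨by omega, by push_cast at h2 ⊢; omega, h3⟩
    · rw [if_neg h, ih]
      constructor
      · rintro ⟨h1, h2, h3⟩
        exact ⟨by omega, by push_cast at h2 ⊢; omega, h3⟩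
      · rintro ⟨h1, h2, h3⟩
        have hx : x ≠ e := by rintro rfl; exact h ((validB_iff G x).2 h3)
        exact ⟨by omega, by push_cast at h2 ⊢; omega, h3⟩

lemma ref_sorted (G : Int) : ∀ (f : Nat) (e : Int), (ref G f e).Pairwise (· < ·) := by
  intro f
  induction f with
  | zero => intro e; simp [ref]
  | succ f ih =>
    intro e
    simp only [ref]
    by_cases h : validB G e = true
    · rw [if_pos h]
      refine List.pairwise_cons.2 ⟨fun x hx => ?_, ih (e + 1)⟩
      have := (ref_mem G f (e + 1) x).1 hx
      omega
    · rw [if_neg h]; exact ih (e + 1)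

lemma ref_eq_nil (G : Int) : ∀ (f : Nat) (e : Int),
    (∀ n : Int, e ≤ n → ¬ Valid G n) → ref G f e = [] := by
  intro f
  induction f with
  | zero => intro e _; simp [ref]
  | succ f ih =>
    intro e h
    simp only [ref]
    have hv : ¬ validB G e = true := fun hc => h e (le_refl _) ((validB_iff G e).1 hc)
    rw [if_neg hv]
    exact ih (e + 1) (fun n hn => h n (by omega))

-- A's two-pointer loop, characterized against ref via the standard invariant
lemma loopA_eq_ref (G : Int) (hG : 1 ≤ G) :
    ∀ (f : Nat) (st e : Int) (acc : List Int),
      1 ≤ st → (st < e ∨ (st = 1 ∧ e = 1)) → e ≤ G + 2 →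
      (2 ≤ st → G < e * e - (st - 1) * (st - 1)) →
      (f : Int) + st + e ≥ 2 * G + 6 →
      loopA G f st e acc = acc ++ ref G (G + 3 - e).toNat e := by
  intro f
  induction f with
  | zero =>
    intro st e acc h1 h2 h3 h4 hf
    exfalso; push_cast at hf; omega
  | succ f ih =>
    intro st e acc h1 h2 h3 h4 hf
    simp only [loopA]
    push_cast at hf
    have hfuel : ((G + 3 : Int) - e).toNat = ((G + 3 : Int) - (e + 1)).toNat + 1 := by omega
    by_cases hres : e * e - st * st = G
    · -- found an answer at e (k = st)
      have hstlt : st < e := by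
        rcases h2 with h2 | ⟨rfl, rfl⟩
        · exact h2
        · exfalso; omega
      have he0 : 1 ≤ e := by omega
      have hv : validB G e = true := (validB_iff G e).2 ⟨st, h1, hstlt, hres⟩
      have hsum : e + st ≤ G := by
        nlinarith [mul_nonneg (by omega : (0:Int) ≤ e - st - 1) (by omega : (0:Int) ≤ e + st)]
      rw [if_pos hres, ih st (e + 1) (acc ++ [e]) h1 (Or.inl (by omega)) (by omega)
          (fun h2s => by nlinarith [h4 h2s, he0]) (by omega)]
      rw [hfuel]
      simp only [ref, hv, if_true]
      simp
    · rw [if_neg hres]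
      have he0 : 1 ≤ e := by rcases h2 with h | ⟨rfl, rfl⟩ <;> omega
      by_cases hlt : e * e - st * st < G
      · -- e is no answer: move e up
        have hv : ¬ validB G e = true := by
          intro hc
          rcases (validB_iff G e).1 hc with ⟨k, hk1, hk2, hk3⟩
          by_cases hks : st ≤ k
          · have hsq : st * st ≤ k * k := mul_le_mul hks hks (by omega) (by omega)
            linarith
          · have h2s : 2 ≤ st := by omega
            have h4' := h4 h2s
            have hsq : k * k ≤ (st - 1) * (st - 1) :=
              mul_le_mul (by omega) (by omega) (by omega) (by omega)
            linarith
        have he1 : e + 1 ≤ G + 2 := by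
          rcases h2 with hlt2 | ⟨rfl, rfl⟩
          · nlinarith [mul_nonneg (by omega : (0:Int) ≤ e - st - 1) (by omega : (0:Int) ≤ e + st)]
          · omega
        rw [if_pos hlt, ih st (e + 1) acc h1
            (Or.inl (by rcases h2 with h | ⟨rfl, rfl⟩ <;> omega)) he1
            (fun h2s => by nlinarith [h4 h2s, he0]) (by omega)]
        rw [hfuel]
        simp only [ref]
        rw [if_neg hv]
      · rw [if_neg hlt]
        have hgt : G < e * e - st * st := by omega
        have hstlt : st < e := by
          rcases h2 with h | ⟨rfl, rfl⟩
          · exact h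
          · exfalso; omega
        by_cases hbrk : e - st = 1
        · -- break: no answer ≥ e remains
          rw [if_pos hbrk]
          rw [ref_eq_nil G _ e ?_, List.append_nil]
          rintro n hn ⟨k, hk1, hk2, hk3⟩
          have hst : st = e - 1 := by omega
          subst hst
          have hk : k * k ≤ (n - 1) * (n - 1) :=
            mul_le_mul (by omega) (by omega) (by omega) (by omega)
          nlinarith [hk]
        · rw [if_neg hbrk]
          exact ih (st + 1) e acc (by omega) (Or.inl (by omega)) h3
            (fun _ => by nlinarith [hgt]) (by omega)

-- B side: Prop form of loopB's divisor test (matches the PySem booleans for 0 < d)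
def HitP (G d : Int) : Prop := G % d = 0 ∧ d < G / d ∧ (d + G / d) % 2 = 0
def nOf (G d : Int) : Int := (d + G / d) / 2

lemma hit_bridge (G d : Int) (hd : 0 < d) :
    (PySem.Int.mod G d = 0 ∧ d < PySem.Int.floordiv G d ∧
       PySem.Int.mod (d + PySem.Int.floordiv G d) 2 = 0) ↔ HitP G d := by
  rw [PySem.Int.mod_eq_emod_of_pos hd, PySem.Int.floordiv_eq_ediv_of_pos hd,
    PySem.Int.mod_eq_emod_of_pos (by norm_num : (0:Int) < 2)]
  exact Iff.rfl

lemma nOf_bridge (G d : Int) (hd : 0 < d) :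
    PySem.Int.floordiv (d + PySem.Int.floordiv G d) 2 = nOf G d := by
  rw [PySem.Int.floordiv_eq_ediv_of_pos hd,
    PySem.Int.floordiv_eq_ediv_of_pos (by norm_num : (0:Int) < 2)]
  rfl

lemma hitP_bounds (G d : Int) (hd : 1 ≤ d) (h : HitP G d) : d * d < G ∧ G = d * (G / d) := by
  obtain ⟨h1, h2, _⟩ := h
  have hdvd : d ∣ G := Int.dvd_of_emod_eq_zero h1
  have hGe : G = d * (G / d) := (Int.mul_ediv_cancel' hdvd).symm
  refine ⟨?_, hGe⟩
  calc d * d < d * (G / d) := mul_lt_mul_of_pos_left h2 (by omega)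
    _ = G := hGe.symm

-- strict monotonicity: a larger divisor d gives a smaller n
lemma nOf_lt (G d e : Int) (hd : 1 ≤ d) (hde : d < e) (hHd : HitP G d) (hHe : HitP G e) :
    nOf G e < nOf G d := by
  obtain ⟨hsq_d, hGd⟩ := hitP_bounds G d hd hHd
  obtain ⟨hsq_e, hGe⟩ := hitP_bounds G e (by omega) hHe
  have hqe_gt : e < G / e := hHe.2.1
  have hsum : e + G / e < d + G / d := by nlinarith [hGd, hGe]
  have hev_d : (d + G / d) % 2 = 0 := hHd.2.2
  have hev_e : (e + G / e) % 2 = 0 := hHe.2.2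
  unfold nOf
  omega

-- membership in loopB's result
lemma loopB_mem (G : Int) (hG : 1 ≤ G) :
    ∀ (f : Nat) (d : Int) (acc : List Int) (x : Int), 1 ≤ d → (f : Int) + d ≥ G + 2 →
      (x ∈ loopB G f d acc ↔ x ∈ acc ∨ ∃ e, d ≤ e ∧ HitP G e ∧ x = nOf G e) := by
  intro f
  induction f with
  | zero =>
    intro d acc x hd hf
    push_cast at hf
    simp only [loopB]
    constructor
    · exact Or.inl
    · rintro (h | ⟨e, he, hH, rfl⟩)
      · exact h
      · exfalso
        obtain ⟨hsq, _⟩ := hitP_bounds G e (by omega) hH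
        nlinarith [mul_le_mul (by omega : (1:Int) ≤ e) (le_refl e) (by omega) (by omega : (0:Int) ≤ e)]
    | succ f ih =>
    intro d acc x hd hf
    push_cast at hf
    simp only [loopB]
    by_cases hsq : d * d ≤ G
    · rw [if_pos hsq, ih (d + 1) _ x (by omega) (by omega)]
      by_cases hhit : PySem.Int.mod G d = 0 ∧ d < PySem.Int.floordiv G d ∧
          PySem.Int.mod (d + PySem.Int.floordiv G d) 2 = 0
      · have hH : HitP G d := (hit_bridge G d (by omega)).1 hhit
        rw [if_pos hhit, nOf_bridge G d (by omega)]
        constructor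
        · rintro (hx | ⟨e, he, hHe, rfl⟩)
          · rcases List.mem_append.1 hx with hx | hx
            · exact Or.inl hx
            · simp only [List.mem_singleton] at hx
              exact Or.inr ⟨d, le_refl _, hH, hx⟩
          · exact Or.inr ⟨e, by omega, hHe, rfl⟩
        · rintro (hx | ⟨e, he, hHe, rfl⟩)
          · exact Or.inl (List.mem_append.2 (Or.inl hx))
          · rcases eq_or_lt_of_le he with rfl | hlt2
            · exact Or.inl (List.mem_append.2 (Or.inr (by simp)))
            · exact Or.inr ⟨e, by omega, hHe, rfl⟩
      · rw [if_neg hhit]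
        constructor
        · rintro (hx | ⟨e, he, hHe, rfl⟩)
          · exact Or.inl hx
          · exact Or.inr ⟨e, by omega, hHe, rfl⟩
        · rintro (hx | ⟨e, he, hHe, rfl⟩)
          · exact Or.inl hx
          · rcases eq_or_lt_of_le he with heq | hlt2
            · exact absurd ((hit_bridge _ _ (by omega)).2 (heq ▸ hHe)) (heq ▸ hhit)
            · exact Or.inr ⟨e, by omega, hHe, rfl⟩
    · rw [if_neg hsq]
      constructor
      · exact Or.inl
      · rintro (hx | ⟨e, he, hHe, rfl⟩)
        · exact hx
        · exfalso
          obtain ⟨hsq_e, _⟩ := hitP_bounds G e (by omega) hHe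
          nlinarith [mul_le_mul he he (by omega : (0:Int) ≤ d) (by omega : (0:Int) ≤ e)]

-- loopB's accumulator stays strictly decreasing
lemma loopB_sorted (G : Int) (_hG : 1 ≤ G) :
    ∀ (f : Nat) (d : Int) (acc : List Int), 1 ≤ d → acc.Pairwise (· > ·) →
      (∀ x ∈ acc, ∀ e, d ≤ e → HitP G e → nOf G e < x) →
      (loopB G f d acc).Pairwise (· > ·) := by
  intro f
  induction f with
  | zero => intro d acc _ hacc _; simpa [loopB] using hacc
  | succ f ih =>
    intro d acc hd hacc hlt
    simp only [loopB]
    by_cases hsq : d * d ≤ G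
    · rw [if_pos hsq]
      by_cases hhit : PySem.Int.mod G d = 0 ∧ d < PySem.Int.floordiv G d ∧
          PySem.Int.mod (d + PySem.Int.floordiv G d) 2 = 0
      · have hH : HitP G d := (hit_bridge G d (by omega)).1 hhit
        rw [if_pos hhit, nOf_bridge G d (by omega)]
        refine ih (d + 1) _ (by omega) ?_ ?_
        · rw [List.pairwise_append]
          exact ⟨hacc, List.pairwise_singleton _ _,
            fun x hx y hy => by
              simp only [List.mem_singleton] at hy
              subst hy
              exact hlt x hx d (le_refl _) hH⟩
        · intro x hx e he hHe
          rcases List.mem_append.1 hx with hx | hx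
          · exact hlt x hx e (by omega) hHe
          · simp only [List.mem_singleton] at hx
            subst hx
            exact nOf_lt G d e hd (by omega) hH hHe
      · rw [if_neg hhit]
        exact ih (d + 1) acc (by omega) hacc
          (fun x hx e he hHe => hlt x hx e (by omega) hHe)
    · rw [if_neg hsq]; exact hacc

-- divisor pairs of G correspond exactly to answers
lemma valid_iff_hit (G x : Int) (_hG : 1 ≤ G) :
    Valid G x ↔ ∃ d, 1 ≤ d ∧ HitP G d ∧ x = nOf G d := by
  constructor
  · rintro ⟨k, hk1, hk2, hk3⟩
    have hfac : G = (x - k) * (x + k) := by ring_nf; ring_nf at hk3; linarith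
    have hdvd : (x - k) ∣ G := ⟨x + k, hfac⟩
    have hdiv : G / (x - k) = x + k := by
      rw [hfac]; exact Int.mul_ediv_cancel_left _ (by omega)
    refine ⟨x - k, by omega, ⟨?_, ?_, ?_⟩, ?_⟩
    · exact Int.emod_eq_zero_of_dvd hdvd
    · rw [hdiv]; omega
    · rw [hdiv]; omega
    · unfold nOf; rw [hdiv]; omega
  · rintro ⟨d, hd, hH, rfl⟩
    obtain ⟨hsq, hGd⟩ := hitP_bounds G d hd hH
    have hlt : d < G / d := hH.2.1
    have hev : (d + G / d) % 2 = 0 := hH.2.2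
    obtain ⟨a, ha⟩ : ∃ a : Int, d + G / d = 2 * a := ⟨(d + G / d) / 2, by omega⟩
    have hnOf : nOf G d = a := by unfold nOf; omega
    rw [hnOf]
    refine ⟨a - d, by omega, by omega, ?_⟩
    have hqa : G / d = 2 * a - d := by omega
    rw [hqa] at hGd
    nlinarith [hGd]

-- strictly increasing lists with the same members are equal
lemma eq_of_sorted_lt_of_mem_iff (l1 l2 : List Int)
    (h1 : l1.Pairwise (· < ·)) (h2 : l2.Pairwise (· < ·))
    (hmem : ∀ x, x ∈ l1 ↔ x ∈ l2) : l1 = l2 := by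
  have n1 : l1.Nodup := h1.imp ne_of_lt
  have n2 : l2.Nodup := h2.imp ne_of_lt
  exact List.Perm.eq_of_pairwise
    (fun a b _ _ hab hba => absurd hba (not_lt.mpr hab.le))
    h1 h2 ((List.perm_ext_iff_of_nodup n1 n2).2 hmem)

lemma search_eq_ref (G : Int) (hG : 1 ≤ G) : search G = ref G (G + 2).toNat 1 := by
  unfold search
  rw [loopA_eq_ref G hG _ 1 1 [] (le_refl _) (Or.inr ⟨rfl, rfl⟩) (by omega)
    (by omega) (by omega)]
  rw [List.nil_append]
  congr 1
  omega

lemma valid_bounds (G x : Int) (_hG : 1 ≤ G) (h : Valid G x) : 1 ≤ x ∧ x < G + 3 := by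
  obtain ⟨k, hk1, hk2, hk3⟩ := h
  refine ⟨by omega, ?_⟩
  nlinarith [mul_nonneg (by omega : (0:Int) ≤ x - k - 1) (by omega : (0:Int) ≤ x + k)]

-- ===== VERDICT (by name: the statement is the Claim_ definition above) =====
theorem search_spec : Claim_equal_search := by
  intro G _ hG
  unfold Spec_search
  unfold Pre_search at hG
  rw [search_eq_ref G hG]
  unfold search_alt
  refine eq_of_sorted_lt_of_mem_iff _ _ (ref_sorted G _ 1) ?_ ?_
  · rw [List.pairwise_reverse]
    exact loopB_sorted G hG _ 1 [] (le_refl _) List.Pairwise.nil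
      (fun x hx => absurd hx (by simp))
  · intro x
    rw [ref_mem, List.mem_reverse,
      loopB_mem G hG _ 1 [] x (le_refl _) (by omega)]
    simp only [List.not_mem_nil, false_or]
    constructor
    · rintro ⟨h1, h2, h3⟩
      exact (valid_iff_hit G x hG).1 h3
    · intro h
      have hv : Valid G x := (valid_iff_hit G x hG).2 h
      have hb := valid_bounds G x hG hv
      exact ⟨by omega, by omega, hv⟩
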